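-- pv_equiv track=rewrite | github.com/masterkah/latent_inr | src/dataset.py | build_track_indices
-- ===== SOURCE A (Python) =====
-- def _normalize_name(name: str) -> str:
--     return name.lower().replace("_", "").replace("-", "")
--
-- def build_track_indices(
--     image_sources, dataset_names, max_per_dataset=3, drop_empty=True
-- ):
--     dataset_keys = [_normalize_name(name) for name in dataset_names]
--     counts = {key: 0 for key in dataset_keys}
--     track_indices = {key: [] for key in dataset_keys}
--     for idx, src in enumerate(image_sources):
--         if src in counts and counts[src] < max_per_dataset:
--             track_indices[src].append(idx)
--             counts[src] += 1
--     if drop_empty: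
--         track_indices = {key: vals for key, vals in track_indices.items() if vals}
--     return track_indices
-- ===== SOURCE B (Python) =====
-- def _normalize_name(name: str) -> str:
--     return name.lower().replace("_", "").replace("-", "")
--
-- def build_track_indices(
--     image_sources, dataset_names, max_per_dataset=3, drop_empty=True
-- ):
--     # One independent scan per dataset key: collect that key's indices,
--     # stopping early once the per-dataset quota is reached.
--     result = {}
--     seen = set()
--     for name in dataset_names:
--         key = _normalize_name(name)
--         if key in seen:
--             continue
--         seen.add(key)
--         indices = []
--         for idx, src in enumerate(image_sources):
--             if len(indices) >= max_per_dataset: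
--                 break
--             if src == key:
--                 indices.append(idx)
--         if indices or not drop_empty:
--             result[key] = indices
--     return result
-- ===== Notes on version B (the rewrite author's own statement) =====
-- stated objective: alternative
-- what changed: B inverts the loop structure: instead of one dict-and-counter pass over image_sources, it makes one independent scan of image_sources per distinct dataset key, collecting that key's indices with an early break at the quota; no counts dict and no per-element dict lookups.
import Mathlib
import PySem

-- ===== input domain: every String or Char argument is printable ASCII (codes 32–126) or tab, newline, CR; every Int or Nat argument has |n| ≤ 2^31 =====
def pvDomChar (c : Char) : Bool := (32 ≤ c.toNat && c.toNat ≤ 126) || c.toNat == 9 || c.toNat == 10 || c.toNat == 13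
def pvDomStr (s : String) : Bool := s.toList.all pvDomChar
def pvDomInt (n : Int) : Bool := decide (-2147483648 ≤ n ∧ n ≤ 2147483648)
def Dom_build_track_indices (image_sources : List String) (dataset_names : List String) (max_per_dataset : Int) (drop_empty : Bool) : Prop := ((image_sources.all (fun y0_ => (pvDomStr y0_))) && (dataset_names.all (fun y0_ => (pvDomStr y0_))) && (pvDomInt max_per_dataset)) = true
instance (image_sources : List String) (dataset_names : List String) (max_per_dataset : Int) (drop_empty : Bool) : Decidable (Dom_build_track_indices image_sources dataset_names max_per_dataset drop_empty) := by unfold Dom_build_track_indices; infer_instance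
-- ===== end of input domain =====

-- B replaces A's single dict-and-counter pass by one independent scan of image_sources per distinct dataset key with an early break at the quota (alternative decomposition; not claimed faster).


-- ===== PORT A =====
-- _normalize_name (the helper shared verbatim by the Python of A and of B)
def pvNormalizeName (name : String) : String :=
  PySem.Str.replace (PySem.Str.replace (PySem.Str.lower name) "_" "") "-" ""

def build_track_indices (image_sources : List String) (dataset_names : List String) (max_per_dataset : Int) (drop_empty : Bool) : List (String × List Int) :=
  let dataset_keys := dataset_names.map pvNormalizeName
  let counts : PySem.Dict String Int :=
    dataset_keys.foldl (fun d k => d.insert k 0) PySem.Dict.empty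
  let track : PySem.Dict String (List Int) :=
    dataset_keys.foldl (fun d k => d.insert k []) PySem.Dict.empty
  let st :=
    (PySem.List.enumerate image_sources 0).foldl
      (fun (st : PySem.Dict String Int × PySem.Dict String (List Int)) p =>
        match st.1.get? p.2 with
        | some c =>
          if c < max_per_dataset then
            (st.1.insert p.2 (c + 1), st.2.modify p.2 [] (fun v => v ++ [p.1]))
          else st
        | none => st)
      (counts, track)
  if drop_empty then
    st.2.items.filter (fun p => !p.2.isEmpty)
  else
    st.2.items

-- ===== PORT B =====
-- B's inner loop: scan the enumerated sources for one key, breaking once the quota is reached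
def pvCollectIdx (key : String) (m : Int) : List (Int × String) → List Int → List Int
  | [], acc => acc
  | (i, s) :: rest, acc =>
    if m ≤ (acc.length : Int) then acc
    else pvCollectIdx key m rest (if s = key then acc ++ [i] else acc)

def build_track_indices_alt (image_sources : List String) (dataset_names : List String) (max_per_dataset : Int) (drop_empty : Bool) : List (String × List Int) :=
  (dataset_names.foldl
    (fun (st : PySem.Set String × List (String × List Int)) name =>
      if PySem.Set.contains st.1 (pvNormalizeName name) then st
      else
        if !(pvCollectIdx (pvNormalizeName name) max_per_dataset (PySem.List.enumerate image_sources 0) []).isEmpty || !drop_empty then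
          (PySem.Set.add st.1 (pvNormalizeName name),
           st.2 ++ [(pvNormalizeName name, pvCollectIdx (pvNormalizeName name) max_per_dataset (PySem.List.enumerate image_sources 0) [])])
        else (PySem.Set.add st.1 (pvNormalizeName name), st.2))
    (PySem.Set.empty, [])).2

-- ===== PRECONDITION & SPEC =====
def Spec_build_track_indices (image_sources : List String) (dataset_names : List String) (max_per_dataset : Int) (drop_empty : Bool) (out : List (String × List Int)) : Prop := out = build_track_indices_alt image_sources dataset_names max_per_dataset drop_empty
instance (image_sources : List String) (dataset_names : List String) (max_per_dataset : Int) (drop_empty : Bool) (out : List (String × List Int)) : Decidable (Spec_build_track_indices image_sources dataset_names max_per_dataset drop_empty out) := by unfold Spec_build_track_indices; infer_instance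

-- ===== CLAIM (what is proved, stated in full; the proofs are below) =====
def Claim_equal_build_track_indices : Prop := ∀ (image_sources : List String) (dataset_names : List String) (max_per_dataset : Int) (drop_empty : Bool), Dom_build_track_indices image_sources dataset_names max_per_dataset drop_empty → Spec_build_track_indices image_sources dataset_names max_per_dataset drop_empty (build_track_indices image_sources dataset_names max_per_dataset drop_empty)

-- ===== LEMMAS AND PROOFS =====

-- the indices whose source equals the key
def pvMatches (k : String) (l : List (Int × String)) : List Int :=
  (l.filter (fun q => q.2 == k)).map (·.1)

-- first-occurrence dedup relative to an already-seen set (proof-side mirror of B's seen-set)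
def pvNewKeys (seen : PySem.Set String) : List String → List String
  | [] => []
  | k :: rest =>
    if PySem.Set.contains seen k then pvNewKeys seen rest
    else k :: pvNewKeys (PySem.Set.add seen k) rest

theorem init_get? {ν : Type} (K : List String) (v : ν) (d : PySem.Dict String ν) (k : String) :
    (K.foldl (fun d x => d.insert x v) d).get? k = if k ∈ K then some v else d.get? k := by
  induction K generalizing d with
  | nil => simp
  | cons x K ih =>
    simp only [List.foldl_cons, ih, List.mem_cons]
    by_cases hK : k ∈ K
    · simp [hK]
    · by_cases hx : k = x
      · simp [hx, PySem.Dict.get?_insert_self]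
      · simp [hx, hK, PySem.Dict.get?_insert_of_ne _ _ hx]

theorem init_getD {ν : Type} (K : List String) (v : ν) (d0 : ν) (k : String) :
    (K.foldl (fun d x => d.insert x v) PySem.Dict.empty).getD k d0
      = if k ∈ K then v else d0 := by
  rw [PySem.Dict.getD_eq_get?_getD, init_get?]
  by_cases h : k ∈ K <;> simp [h]

theorem set_update_self (xs : List String) (s : PySem.Set String) (h : ∀ x ∈ xs, x ∈ s) :
    PySem.Set.update s xs = s := by
  induction xs generalizing s with
  | nil => rfl
  | cons x xs ih =>
    have hx : PySem.Set.contains s x = true := (PySem.Set.contains_iff s x).2 (h x (by simp))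
    simp only [PySem.Set.update, List.foldl_cons, PySem.Set.add, hx, if_pos]
    exact ih s (fun y hy => h y (by simp [hy]))

theorem newKeys_update (K : List String) (seen : PySem.Set String) :
    PySem.Set.update seen K = seen ++ pvNewKeys seen K := by
  induction K generalizing seen with
  | nil => simp [PySem.Set.update, pvNewKeys]
  | cons k K ih =>
    by_cases hk : PySem.Set.contains seen k
    · have hadd : PySem.Set.add seen k = seen := by rw [PySem.Set.add, if_pos hk]
      simp only [PySem.Set.update, List.foldl_cons, pvNewKeys]
      rw [if_pos hk, hadd]
      have h := ih seen
      simp only [PySem.Set.update] at h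
      rw [h]
    · have hadd : PySem.Set.add seen k = seen ++ [k] := by rw [PySem.Set.add, if_neg hk]
      simp only [PySem.Set.update, List.foldl_cons, pvNewKeys]
      rw [if_neg hk]
      have h := ih (PySem.Set.add seen k)
      simp only [PySem.Set.update] at h
      rw [h, hadd]
      simp

theorem newKeys_nil_eq_ofList (K : List String) :
    pvNewKeys PySem.Set.empty K = PySem.Set.ofList K := by
  have := newKeys_update K PySem.Set.empty
  rw [PySem.Set.ofList_eq_foldl]
  simpa [PySem.Set.update, PySem.Set.empty] using this.symm

theorem collect_char (k : String) (m : Int) (l : List (Int × String)) (acc : List Int) :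
    pvCollectIdx k m l acc = acc ++ (pvMatches k l).take (max 0 (m - acc.length)).toNat := by
  induction l generalizing acc with
  | nil => simp [pvCollectIdx, pvMatches]
  | cons p l ih =>
    obtain ⟨i, s⟩ := p
    by_cases hm : m ≤ (acc.length : Int)
    · simp [pvCollectIdx, hm]
    · by_cases hs : s = k
      · have hsk : (s == k) = true := by simp [hs]
        simp only [pvCollectIdx, if_neg hm, if_pos hs, ih]
        have hmt : pvMatches k ((i, s) :: l) = i :: pvMatches k l := by
          simp [pvMatches, hsk]
        rw [hmt]
        have h1 : (max 0 (m - ((acc ++ [i]).length : Int))).toNat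
            = (max 0 (m - acc.length)).toNat - 1 := by
          simp only [List.length_append, List.length_cons, List.length_nil]
          omega
        have h2 : (max 0 (m - (acc.length : Int))).toNat = ((max 0 (m - acc.length)).toNat - 1) + 1 := by
          omega
        rw [h1, h2, List.take_succ_cons]
        simp
      · have hsk : (s == k) = false := by simp [hs]
        simp only [pvCollectIdx, if_neg hm, if_neg hs, ih]
        have hmt : pvMatches k ((i, s) :: l) = pvMatches k l := by
          simp [pvMatches, hsk]
        rw [hmt]

theorem collect_char0 (k : String) (m : Int) (l : List (Int × String)) :
    pvCollectIdx k m l [] = (pvMatches k l).take (max 0 m).toNat := by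
  simpa using collect_char k m l []

theorem group_getD (S : PySem.Set String) (l : List (Int × String))
    (d : PySem.Dict String (List Int)) (k : String) (hk : PySem.Set.contains S k = true) :
    (l.foldl (fun d p => if PySem.Set.contains S p.2 then d.modify p.2 [] (fun v => v ++ [p.1]) else d) d).getD k []
      = d.getD k [] ++ pvMatches k l := by
  rw [PySem.List.foldl_if_eq_foldl_filter]
  have hswap : (l.filter (fun p => PySem.Set.contains S p.2)).foldl
      (fun d p => d.modify p.2 [] (fun v => v ++ [p.1])) d
      = ((l.filter (fun p => PySem.Set.contains S p.2)).map Prod.swap).foldl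
          (fun d q => d.modify q.1 [] (fun v => v ++ [q.2])) d := by
    rw [List.foldl_map]
    rfl
  rw [hswap, PySem.Dict.getD_foldl_modify_append]
  congr 1
  rw [List.filter_map]
  have hflt : ((l.filter (fun p => PySem.Set.contains S p.2)).filter
      ((fun q : String × Int => q.1 == k) ∘ Prod.swap))
      = l.filter (fun q => q.2 == k) := by
    rw [List.filter_filter]
    apply List.filter_congr
    intro a _
    by_cases ha : a.2 = k
    · have h1 : (a.2 == k) = true := by simp [ha]
      have h2 : a.2 ∈ S := by rw [ha]; exact (PySem.Set.contains_iff S k).1 hk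
      simp [h1, h2]
    · simp [ha]
  rw [hflt, List.map_map]
  simp [pvMatches]

theorem loop_inv (m : Int) (S : List String) (l : List (Int × String))
    (counts : PySem.Dict String Int) (tA tB : PySem.Dict String (List Int))
    (hKA : tA.keys = tB.keys) (hnd : tB.keys.Nodup)
    (hS : ∀ k, k ∈ S ↔ k ∈ tB.keys)
    (hc : ∀ k, counts.get? k =
      if k ∈ S then some (((tB.getD k []).take (max 0 m).toNat).length : Int) else none)
    (hv : ∀ k, tA.getD k [] = (tB.getD k []).take (max 0 m).toNat) :
    (l.foldl
      (fun (st : PySem.Dict String Int × PySem.Dict String (List Int)) p =>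
        match st.1.get? p.2 with
        | some c =>
          if c < m then
            (st.1.insert p.2 (c + 1), st.2.modify p.2 [] (fun v => v ++ [p.1]))
          else st
        | none => st) (counts, tA)).2.keys
      = (l.foldl
          (fun (d : PySem.Dict String (List Int)) p =>
            if PySem.Set.contains S p.2 then d.modify p.2 [] (fun v => v ++ [p.1]) else d) tB).keys
    ∧ (l.foldl
          (fun (d : PySem.Dict String (List Int)) p =>
            if PySem.Set.contains S p.2 then d.modify p.2 [] (fun v => v ++ [p.1]) else d) tB).keys.Nodup
    ∧ ∀ k, (l.foldl
      (fun (st : PySem.Dict String Int × PySem.Dict String (List Int)) p =>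
        match st.1.get? p.2 with
        | some c =>
          if c < m then
            (st.1.insert p.2 (c + 1), st.2.modify p.2 [] (fun v => v ++ [p.1]))
          else st
        | none => st) (counts, tA)).2.getD k []
      = ((l.foldl
          (fun (d : PySem.Dict String (List Int)) p =>
            if PySem.Set.contains S p.2 then d.modify p.2 [] (fun v => v ++ [p.1]) else d) tB).getD k []).take (max 0 m).toNat := by
  induction l generalizing counts tA tB with
  | nil => exact ⟨hKA, hnd, hv⟩
  | cons p l ih =>
    obtain ⟨i, s⟩ := p
    simp only [List.foldl_cons]
    by_cases hs : s ∈ S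
    · -- key is tracked
      have hsB : s ∈ tB.keys := (hS s).1 hs
      have hsBc : tB.contains s = true := (PySem.Dict.contains_iff_mem_keys _ _).2 hsB
      have hsA : tA.contains s = true := (PySem.Dict.contains_iff_mem_keys _ _).2 (hKA ▸ hsB)
      have hcs := hc s
      rw [if_pos hs] at hcs
      have hScon : PySem.Set.contains S s = true := by simpa [PySem.Set.contains] using hs
      by_cases hlt : ((((tB.getD s []).take (max 0 m).toNat).length : Nat) : Int) < m
      · -- both append; the cap is not yet reached
        simp only [hcs, hScon, if_pos hlt, if_true, PySem.Dict.modify]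
        have hlen : (tB.getD s []).length < (max 0 m).toNat := by
          have h1 := List.length_take (i := (max 0 m).toNat) (l := tB.getD s [])
          omega
        apply ih
        · rw [PySem.Dict.keys_insert_of_contains _ _ hsA,
            PySem.Dict.keys_insert_of_contains _ _ hsBc, hKA]
        · rw [PySem.Dict.keys_insert_of_contains _ _ hsBc]; exact hnd
        · intro k; rw [PySem.Dict.keys_insert_of_contains _ _ hsBc]; exact hS k
        · intro k
          rw [PySem.Dict.get?_insert]
          by_cases hk : k = s
          · rw [if_pos hk, hk, if_pos hs, PySem.Dict.getD_insert_self]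
            congr 1
            have h1 : ((tB.getD s []).take (max 0 m).toNat).length = (tB.getD s []).length :=
              by rw [List.take_of_length_le (le_of_lt hlen)]
            have h2 : ((tB.getD s [] ++ [i]).take (max 0 m).toNat).length
                = (tB.getD s []).length + 1 := by
              rw [List.take_of_length_le (by simp; omega)]; simp
            rw [h1, h2]; push_cast; ring
          · rw [if_neg hk, hc k, PySem.Dict.getD_insert_of_ne _ _ _ hk]
        · intro k
          by_cases hk : k = s
          · rw [hk, PySem.Dict.getD_insert_self, PySem.Dict.getD_insert_self, hv s,
              List.take_of_length_le (le_of_lt hlen),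
              List.take_of_length_le (by simp; omega)]
          · rw [PySem.Dict.getD_insert_of_ne _ _ _ hk,
              PySem.Dict.getD_insert_of_ne _ _ _ hk, hv k]
      · -- cap reached (or non-positive): A keeps its state, B appends past the cap
        simp only [hcs, hScon, if_neg hlt, if_true, PySem.Dict.modify]
        have hge : (max 0 m).toNat ≤ (tB.getD s []).length := by
          have h1 := List.length_take (i := (max 0 m).toNat) (l := tB.getD s [])
          omega
        apply ih
        · rw [PySem.Dict.keys_insert_of_contains _ _ hsBc, hKA]
        · rw [PySem.Dict.keys_insert_of_contains _ _ hsBc]; exact hnd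
        · intro k; rw [PySem.Dict.keys_insert_of_contains _ _ hsBc]; exact hS k
        · intro k
          by_cases hk : k = s
          · rw [hk, if_pos hs, PySem.Dict.getD_insert_self,
              List.take_append_of_le_length hge]
            exact hcs
          · rw [hc k, PySem.Dict.getD_insert_of_ne _ _ _ hk]
        · intro k
          by_cases hk : k = s
          · rw [hk, hv s, PySem.Dict.getD_insert_self, List.take_append_of_le_length hge]
          · rw [hv k, PySem.Dict.getD_insert_of_ne _ _ _ hk]
    · -- untracked key: both states unchanged
      have hcs := hc s
      rw [if_neg hs] at hcs
      have hScon : PySem.Set.contains S s = false := by simpa [PySem.Set.contains] using hs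
      simp only [hcs, hScon, Bool.false_eq_true, if_false]
      exact ih counts tA tB hKA hnd hS hc hv

-- B's outer fold, characterised as map-then-filter over the first-occurrence dedup of the keys
theorem outerB (srcs : List String) (m : Int) (de : Bool) (names : List String)
    (seen : PySem.Set String) (acc : List (String × List Int)) :
    (names.foldl
      (fun (st : PySem.Set String × List (String × List Int)) name =>
        if PySem.Set.contains st.1 (pvNormalizeName name) then st
        else
          if !(pvCollectIdx (pvNormalizeName name) m (PySem.List.enumerate srcs 0) []).isEmpty || !de then
            (PySem.Set.add st.1 (pvNormalizeName name),
             st.2 ++ [(pvNormalizeName name, pvCollectIdx (pvNormalizeName name) m (PySem.List.enumerate srcs 0) [])])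
          else (PySem.Set.add st.1 (pvNormalizeName name), st.2))
      (seen, acc)).2
    = acc ++ ((pvNewKeys seen (names.map pvNormalizeName)).map
        (fun k => (k, pvCollectIdx k m (PySem.List.enumerate srcs 0) []))).filter
        (fun p => !p.2.isEmpty || !de) := by
  induction names generalizing seen acc with
  | nil => simp [pvNewKeys]
  | cons name names ih =>
    simp only [List.foldl_cons, List.map_cons, pvNewKeys]
    by_cases hc : PySem.Set.contains seen (pvNormalizeName name)
    · simp only [hc, if_true, ih]
    · simp only [hc, Bool.false_eq_true, if_false]
      by_cases hp : (!(pvCollectIdx (pvNormalizeName name) m (PySem.List.enumerate srcs 0) []).isEmpty || !de) = true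
      · rw [if_pos hp, ih]
        simp [hp]
      · rw [if_neg hp, ih]
        simp only [Bool.not_eq_true] at hp
        simp [hp]

theorem ports_agree (image_sources dataset_names : List String) (m : Int) (de : Bool) :
    build_track_indices image_sources dataset_names m de
      = build_track_indices_alt image_sources dataset_names m de := by
  simp only [build_track_indices, build_track_indices_alt]
  rw [outerB, newKeys_nil_eq_ofList]
  set K := dataset_names.map pvNormalizeName with hK
  set enum := PySem.List.enumerate image_sources 0 with henum
  set SK := PySem.Set.ofList K with hSK
  set d0 : PySem.Dict String (List Int) :=
    K.foldl (fun d k => d.insert k []) PySem.Dict.empty with hd0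
  -- initial dict facts
  have hd0keys : d0.keys = SK := by
    rw [hd0, PySem.Dict.keys_foldl_insert, hSK, PySem.Set.ofList_eq_foldl]
    rfl
  have hd0getD : ∀ k, d0.getD k [] = [] := by
    intro k; rw [hd0, init_getD]; split <;> rfl
  -- A's loop versus the uncapped grouping fold
  obtain ⟨h1, h2, h3⟩ := loop_inv m SK enum
    (K.foldl (fun d k => d.insert k 0) PySem.Dict.empty) d0 d0
    rfl
    (hd0keys ▸ PySem.Set.nodup_ofList K)
    (by intro k; rw [hd0keys])
    (by
      intro k
      rw [init_get?]
      by_cases h : k ∈ K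
      · have hmem : k ∈ SK := by rw [hSK]; exact (PySem.Set.mem_ofList K k).2 h
        rw [if_pos h, if_pos hmem, hd0getD]; simp
      · have hmem : k ∉ SK := by rw [hSK]; exact fun hx => h ((PySem.Set.mem_ofList K k).1 hx)
        rw [if_neg h, if_neg hmem]; simp)
    (by intro k; rw [hd0getD]; simp)
  -- the grouping fold keeps exactly the initial keys
  set G := enum.foldl
      (fun (d : PySem.Dict String (List Int)) p =>
        if PySem.Set.contains SK p.2 then d.modify p.2 [] (fun v => v ++ [p.1]) else d) d0 with hG
  have hGkeys : G.keys = SK := by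
    rw [hG, PySem.List.foldl_if_eq_foldl_filter]
    have : (enum.filter (fun p => PySem.Set.contains SK p.2)).foldl
        (fun d p => d.modify p.2 [] (fun v => v ++ [p.1])) d0
        = (enum.filter (fun p => PySem.Set.contains SK p.2)).foldl
            (fun d p => d.modify ((fun q : Int × String => q.2) p) [] (fun v => v ++ [p.1])) d0 := rfl
    rw [this, PySem.Dict.keys_foldl_modify_key, hd0keys]
    apply set_update_self
    intro x hx
    simp only [List.mem_map, List.mem_filter] at hx
    obtain ⟨p, ⟨_, hp⟩, rfl⟩ := hx
    exact (PySem.Set.contains_iff _ _).1 hp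
  -- A's result dict rendered as a map over the keys
  have hAnd : ((enum.foldl
      (fun (st : PySem.Dict String Int × PySem.Dict String (List Int)) p =>
        match st.1.get? p.2 with
        | some c =>
          if c < m then
            (st.1.insert p.2 (c + 1), st.2.modify p.2 [] (fun v => v ++ [p.1]))
          else st
        | none => st)
      (K.foldl (fun d k => d.insert k 0) PySem.Dict.empty, d0)).2).keys.Nodup := by
    rw [h1]; exact h2
  rw [PySem.Dict.items_eq_map_keys _ hAnd ([] : List Int), h1, hGkeys]
  have hmap : SK.map (fun k =>
      (k, (enum.foldl
        (fun (st : PySem.Dict String Int × PySem.Dict String (List Int)) p =>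
          match st.1.get? p.2 with
          | some c =>
            if c < m then
              (st.1.insert p.2 (c + 1), st.2.modify p.2 [] (fun v => v ++ [p.1]))
            else st
          | none => st)
        (K.foldl (fun d k => d.insert k 0) PySem.Dict.empty, d0)).2.getD k []))
      = SK.map (fun k => (k, pvCollectIdx k m enum [])) := by
    apply List.map_congr_left
    intro k hk
    have hkc : PySem.Set.contains SK k = true := (PySem.Set.contains_iff _ _).2 hk
    rw [h3 k, hG, group_getD SK enum d0 k hkc, hd0getD, List.nil_append, collect_char0]
  rw [hmap]
  cases de
  · simp
  · simp

-- ===== VERDICT (by name: the statement is the Claim_ definition above) =====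
theorem build_track_indices_spec : Claim_equal_build_track_indices := by
  intro image_sources dataset_names max_per_dataset drop_empty _
  unfold Spec_build_track_indices
  exact ports_agree image_sources dataset_names max_per_dataset drop_empty
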